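-- pv_equiv track=rewrite | github.com/vcmb-cyclo/com_contentbuilder-ng | scripts/dedup_translation_keys.py | select_canonical_key
-- ===== SOURCE A (Python) =====
-- def select_canonical_key(duplicate_keys, value):
--     """Select the best canonical key from duplicates"""
--     # Preference order (most semantic = best)
--     preferences = [
--         lambda k: k.count('COM_CONTENTBUILDERNG') > 0,  # Prefer full component name
--         lambda k: not k.endswith('_BUTTON'),  # Avoid generic _BUTTON suffix
--         lambda k: not k.endswith('_LABEL'),   # Avoid generic _LABEL suffix
--         lambda k: not k.startswith('PUBLISHED'),  # Avoid bare PUBLISHED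
--         lambda k: len(k) < 60,  # Prefer shorter, clearer names
--     ]
--
--     scored_keys = [(k, sum(1 for p in preferences if p(k))) for k in duplicate_keys]
--     scored_keys.sort(key=lambda x: (-x[1], x[0]))  # Sort by score (descending), then alphabetically
--
--     return scored_keys[0][0]
-- ===== SOURCE B (Python) =====
-- def select_canonical_key(duplicate_keys, value):
--     """Bucket keys by their bounded score (0..5), keeping only the lexicographically
--     smallest key per bucket, then return the key of the highest non-empty bucket."""
--     best = [None] * 6  # best[s] = smallest key seen so far with score s
--     for k in duplicate_keys:
--         s = ((k.count('COM_CONTENTBUILDERNG') > 0)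
--              + (not k.endswith('_BUTTON'))
--              + (not k.endswith('_LABEL'))
--              + (not k.startswith('PUBLISHED'))
--              + (len(k) < 60))
--         if best[s] is None or k < best[s]:
--             best[s] = k
--     for s in range(5, -1, -1):
--         if best[s] is not None:
--             return best[s]
-- ===== Notes on version B (the rewrite author's own statement) =====
-- stated objective: faster
-- what changed: Instead of building a scored list and sorting it, B does a counting-sort-style bucket pass: since the score is bounded in 0..5, one pass keeps per-score buckets holding only the lexicographically smallest key, and the answer is read off the highest non-empty bucket.
-- outside the precondition, e.g. on select_canonical_key([], 'v'): A raises IndexError, B returns None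
import Mathlib
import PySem

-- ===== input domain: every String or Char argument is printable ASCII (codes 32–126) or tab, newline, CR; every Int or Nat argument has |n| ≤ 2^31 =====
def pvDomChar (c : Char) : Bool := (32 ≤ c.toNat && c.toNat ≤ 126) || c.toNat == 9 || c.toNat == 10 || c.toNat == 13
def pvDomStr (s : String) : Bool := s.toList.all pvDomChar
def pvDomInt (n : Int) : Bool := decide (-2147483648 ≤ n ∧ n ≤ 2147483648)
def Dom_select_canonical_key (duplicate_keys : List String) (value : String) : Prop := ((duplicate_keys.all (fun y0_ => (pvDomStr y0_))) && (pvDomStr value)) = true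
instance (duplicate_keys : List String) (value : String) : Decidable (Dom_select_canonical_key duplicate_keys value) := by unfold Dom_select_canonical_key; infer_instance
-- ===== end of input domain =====

-- B replaces A's build-scored-list-then-sort with a counting-sort-style bucket pass over the bounded score range 0..5; objective: faster (O(n) vs O(n log n), measured).

-- ===== PORT A =====
-- the five preference predicates, in A's order
def pvPrefs : List (String → Bool) :=
  [fun k => decide (PySem.Str.count k "COM_CONTENTBUILDERNG" > 0),
   fun k => !PySem.Str.endswith k "_BUTTON",
   fun k => !PySem.Str.endswith k "_LABEL",
   fun k => !PySem.Str.startswith k "PUBLISHED",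
   fun k => decide (PySem.Str.len k < 60)]

def select_canonical_key (duplicate_keys : List String) (value : String) : String :=
  let scored_keys := duplicate_keys.map
    (fun k => (k, pvPrefs.foldl (fun acc p => if p k then acc + 1 else acc) (0 : Int)))
  -- scored_keys.sort(key=lambda x: (-x[1], x[0])); return scored_keys[0][0]
  ((PySem.List.pyGet? (PySem.List.sorted2 scored_keys (fun x => -x.2) (fun x => x.1)) 0).getD ("", 0)).1

-- ===== PORT B =====
-- the inline 5-term score of Source B (a Nat: it is used as a bucket index)
def pvScoreB (k : String) : Nat :=
  (if PySem.Str.count k "COM_CONTENTBUILDERNG" > 0 then 1 else 0)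
  + (if !PySem.Str.endswith k "_BUTTON" then 1 else 0)
  + (if !PySem.Str.endswith k "_LABEL" then 1 else 0)
  + (if !PySem.Str.startswith k "PUBLISHED" then 1 else 0)
  + (if PySem.Str.len k < 60 then 1 else 0)

-- loop body: 'if best[s] is None or k < best[s]: best[s] = k'
def pvBucketStep (best : List (Option String)) (k : String) : List (Option String) :=
  match best.getD (pvScoreB k) none with
  | none => best.set (pvScoreB k) (some k)
  | some m => if k < m then best.set (pvScoreB k) (some k) else best

def select_canonical_key_alt (duplicate_keys : List String) (value : String) : String :=
  let best := duplicate_keys.foldl pvBucketStep (List.replicate 6 none)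
  -- for s in range(5, -1, -1): if best[s] is not None: return best[s]
  -- (falling off the loop returns Python None; Pre_ excludes the empty list where that happens)
  (((List.range 6).reverse.findSome? (fun s => best.getD s none)).getD "")

-- ===== PRECONDITION & SPEC =====
-- A raises IndexError on an empty list (and B returns no string there); Pre_ excludes exactly that.
def Pre_select_canonical_key (duplicate_keys : List String) (value : String) : Prop :=
  duplicate_keys ≠ []
instance (duplicate_keys : List String) (value : String) : Decidable (Pre_select_canonical_key duplicate_keys value) := by unfold Pre_select_canonical_key; infer_instance

def pvWitness_select_canonical_key : List String × String := (["PUBLISHED_BUTTON", "COM_CONTENTBUILDERNG_SAVE"], "Save")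

def Spec_select_canonical_key (duplicate_keys : List String) (value : String) (out : String) : Prop := out = select_canonical_key_alt duplicate_keys value
instance (duplicate_keys : List String) (value : String) (out : String) : Decidable (Spec_select_canonical_key duplicate_keys value out) := by unfold Spec_select_canonical_key; infer_instance

-- ===== CLAIM (what is proved, stated in full; the proofs are below) =====
def Claim_equal_select_canonical_key : Prop := ∀ (duplicate_keys : List String) (value : String), Dom_select_canonical_key duplicate_keys value → Pre_select_canonical_key duplicate_keys value → Spec_select_canonical_key duplicate_keys value (select_canonical_key duplicate_keys value)

-- ===== LEMMAS AND PROOFS =====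

-- the score is bounded by 5 (hence a valid bucket index)
theorem pvScoreB_le (k : String) : pvScoreB k ≤ 5 := by
  unfold pvScoreB; split_ifs <;> omega

-- A's 5-step counting loop computes B's score (as an Int)
theorem pvScore_eq (k : String) :
    pvPrefs.foldl (fun acc p => if p k then acc + 1 else acc) (0 : Int) = (pvScoreB k : Int) := by
  simp only [pvPrefs, List.foldl, pvScoreB]
  split_ifs <;> simp_all <;> omega

-- invariant of B's bucket loop over the processed prefix 'seen'
def BInv (seen : List String) (best : List (Option String)) : Prop :=
  best.length = 6 ∧ ∀ s : Nat, s < 6 →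
    ((best.getD s none = none → ∀ k ∈ seen, pvScoreB k ≠ s) ∧
     (∀ m, best.getD s none = some m →
        m ∈ seen ∧ pvScoreB m = s ∧ ∀ k ∈ seen, pvScoreB k = s → m ≤ k))

theorem BInv_init : BInv [] (List.replicate 6 none) := by
  constructor
  · simp
  · intro s hs
    constructor
    · intro _ k hk; simp at hk
    · intro m hm
      rw [List.getD_eq_getElem?_getD, List.getElem?_replicate] at hm
      split at hm <;> simp_all

theorem getD_set_eq_getElem (best : List (Option String)) (i j : Nat) (v : Option String) :
    (best.set i v).getD j none = if i = j ∧ i < best.length then v else best.getD j none := by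
  rw [List.getD_eq_getElem?_getD, List.getD_eq_getElem?_getD, List.getElem?_set]
  by_cases h1 : i = j
  · subst h1
    by_cases h2 : i < best.length <;> simp [h2]
  · simp [h1]

theorem BInv_step (seen : List String) (best : List (Option String)) (k : String)
    (h : BInv seen best) : BInv (seen ++ [k]) (pvBucketStep best k) := by
  obtain ⟨hlen, hinv⟩ := h
  have hs0 : pvScoreB k < 6 := Nat.lt_succ_of_le (pvScoreB_le k)
  unfold pvBucketStep
  cases hb : best.getD (pvScoreB k) none with
  | none =>
      refine ⟨by simpa using hlen, fun s hs => ?_⟩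
      rw [getD_set_eq_getElem]
      by_cases hes : pvScoreB k = s
      · subst hes
        simp only [hlen, hs0, and_true]
        refine ⟨by simp, fun m hm => ?_⟩
        obtain rfl : k = m := by simpa using hm
        refine ⟨by simp, rfl, fun k' hk' hsc => ?_⟩
        rcases List.mem_append.1 hk' with h1 | h1
        · exact absurd hsc ((hinv _ hs).1 hb k' h1)
        · obtain rfl : k' = k := by simpa using h1
          exact le_refl _
      · simp only [hes, false_and]
        refine ⟨fun hn k' hk' => ?_, fun m hm => ?_⟩
        · rcases List.mem_append.1 hk' with h1 | h1
          · exact (hinv _ hs).1 hn k' h1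
          · obtain rfl : k' = k := by simpa using h1
            exact hes
        · obtain ⟨h1, h2, h3⟩ := (hinv _ hs).2 m hm
          refine ⟨List.mem_append_left _ h1, h2, fun k' hk' hsc => ?_⟩
          rcases List.mem_append.1 hk' with h4 | h4
          · exact h3 k' h4 hsc
          · obtain rfl : k' = k := by simpa using h4
            exact absurd hsc hes
  | some m0 =>
      dsimp only
      split_ifs with hlt
      · -- k < m0 : overwrite the bucket
        refine ⟨by simpa using hlen, fun s hs => ?_⟩
        rw [getD_set_eq_getElem]
        by_cases hes : pvScoreB k = s
        · subst hes
          simp only [hlen, hs0, and_true]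
          refine ⟨by simp, fun m hm => ?_⟩
          obtain rfl : k = m := by simpa using hm
          obtain ⟨h1, h2, h3⟩ := (hinv _ hs).2 m0 hb
          refine ⟨by simp, rfl, fun k' hk' hsc => ?_⟩
          rcases List.mem_append.1 hk' with h4 | h4
          · exact le_of_lt (lt_of_lt_of_le hlt (h3 k' h4 hsc))
          · obtain rfl : k' = k := by simpa using h4
            exact le_refl _
        · simp only [hes, false_and]
          refine ⟨fun hn k' hk' => ?_, fun m hm => ?_⟩
          · rcases List.mem_append.1 hk' with h1 | h1
            · exact (hinv _ hs).1 hn k' h1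
            · obtain rfl : k' = k := by simpa using h1
              exact hes
          · obtain ⟨h1, h2, h3⟩ := (hinv _ hs).2 m hm
            refine ⟨List.mem_append_left _ h1, h2, fun k' hk' hsc => ?_⟩
            rcases List.mem_append.1 hk' with h4 | h4
            · exact h3 k' h4 hsc
            · obtain rfl : k' = k := by simpa using h4
              exact absurd hsc hes
      · -- m0 ≤ k : bucket unchanged
        refine ⟨hlen, fun s hs => ?_⟩
        by_cases hes : pvScoreB k = s
        · subst hes
          refine ⟨fun hn => by rw [hn] at hb; simp at hb, fun m hm => ?_⟩
          rw [hb] at hm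
          obtain rfl : m0 = m := by simpa using hm
          obtain ⟨h1, h2, h3⟩ := (hinv _ hs).2 m0 hb
          refine ⟨List.mem_append_left _ h1, h2, fun k' hk' hsc => ?_⟩
          rcases List.mem_append.1 hk' with h4 | h4
          · exact h3 k' h4 hsc
          · obtain rfl : k' = k := by simpa using h4
            exact le_of_not_gt hlt
        · refine ⟨fun hn k' hk' => ?_, fun m hm => ?_⟩
          · rcases List.mem_append.1 hk' with h1 | h1
            · exact (hinv _ hs).1 hn k' h1
            · obtain rfl : k' = k := by simpa using h1
              exact hes
          · obtain ⟨h1, h2, h3⟩ := (hinv _ hs).2 m hm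
            refine ⟨List.mem_append_left _ h1, h2, fun k' hk' hsc => ?_⟩
            rcases List.mem_append.1 hk' with h4 | h4
            · exact h3 k' h4 hsc
            · obtain rfl : k' = k := by simpa using h4
              exact absurd hsc hes

theorem BInv_foldl (l : List String) : ∀ (seen : List String) (best : List (Option String)),
    BInv seen best → BInv (seen ++ l) (l.foldl pvBucketStep best) := by
  induction l with
  | nil => intro seen best h; simpa using h
  | cons x t ih =>
      intro seen best h
      have := ih (seen ++ [x]) (pvBucketStep best x) (BInv_step seen best x h)
      simpa using this

-- if bucket s holds b and every key scores ≤ s, then b is the best key overall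
theorem pick_at (dk : List String) (best : List (Option String)) (hinv : BInv dk best)
    (s : Nat) (hs : s < 6) (b : String) (hb : best.getD s none = some b)
    (habove : ∀ k ∈ dk, pvScoreB k ≤ s) :
    b ∈ dk ∧ ∀ k ∈ dk, pvScoreB k ≤ pvScoreB b ∧ (pvScoreB k = pvScoreB b → b ≤ k) := by
  obtain ⟨hmem, hsc, hmin⟩ := (hinv.2 s hs).2 b hb
  refine ⟨hmem, fun k hk => ⟨hsc ▸ habove k hk, fun he => hmin k hk (by omega)⟩⟩

-- the highest non-empty bucket yields the (max score, lexicographically least) key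
theorem bucket_pick (dk : List String) (best : List (Option String))
    (hinv : BInv dk best) (hne : dk ≠ []) :
    ∃ b, (List.range 6).reverse.findSome? (fun s => best.getD s none) = some b ∧ b ∈ dk ∧
      ∀ k ∈ dk, pvScoreB k ≤ pvScoreB b ∧ (pvScoreB k = pvScoreB b → b ≤ k) := by
  have hrev : (List.range 6).reverse = [5, 4, 3, 2, 1, 0] := by decide
  rw [hrev]
  simp only [List.findSome?]
  cases h5 : best.getD 5 none with
  | some b => exact ⟨b, rfl, pick_at dk best hinv 5 (by omega) b h5 (fun k hk => pvScoreB_le k)⟩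
  | none =>
  have n5 := (hinv.2 5 (by omega)).1 h5
  have a4 : ∀ k ∈ dk, pvScoreB k ≤ 4 := fun k hk => by have := pvScoreB_le k; have := n5 k hk; omega
  cases h4 : best.getD 4 none with
  | some b => exact ⟨b, rfl, pick_at dk best hinv 4 (by omega) b h4 a4⟩
  | none =>
  have n4 := (hinv.2 4 (by omega)).1 h4
  have a3 : ∀ k ∈ dk, pvScoreB k ≤ 3 := fun k hk => by have := a4 k hk; have := n4 k hk; omega
  cases h3 : best.getD 3 none with
  | some b => exact ⟨b, rfl, pick_at dk best hinv 3 (by omega) b h3 a3⟩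
  | none =>
  have n3 := (hinv.2 3 (by omega)).1 h3
  have a2 : ∀ k ∈ dk, pvScoreB k ≤ 2 := fun k hk => by have := a3 k hk; have := n3 k hk; omega
  cases h2 : best.getD 2 none with
  | some b => exact ⟨b, rfl, pick_at dk best hinv 2 (by omega) b h2 a2⟩
  | none =>
  have n2 := (hinv.2 2 (by omega)).1 h2
  have a1 : ∀ k ∈ dk, pvScoreB k ≤ 1 := fun k hk => by have := a2 k hk; have := n2 k hk; omega
  cases h1 : best.getD 1 none with
  | some b => exact ⟨b, rfl, pick_at dk best hinv 1 (by omega) b h1 a1⟩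
  | none =>
  have n1 := (hinv.2 1 (by omega)).1 h1
  have a0 : ∀ k ∈ dk, pvScoreB k ≤ 0 := fun k hk => by have := a1 k hk; have := n1 k hk; omega
  cases h0 : best.getD 0 none with
  | some b => exact ⟨b, rfl, pick_at dk best hinv 0 (by omega) b h0 a0⟩
  | none =>
  have n0 := (hinv.2 0 (by omega)).1 h0
  obtain ⟨k0, hk0⟩ := List.exists_mem_of_ne_nil dk hne
  exact absurd (Nat.le_zero.1 (a0 k0 hk0)) (n0 k0 hk0)


-- Python's tuple comparison (-k1, k2) as a lexicographic key
theorem pvBefore_eq {α : Type} (k1 : α → Int) (k2 : α → String) (a b : α) :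
    (decide (k1 a < k1 b) || (!decide (k1 b < k1 a) && decide (k2 a < k2 b)))
      = decide (toLex (k1 a, k2 a) < toLex (k1 b, k2 b)) := by
  rcases lt_trichotomy (k1 a) (k1 b) with h | h | h
  · simp [h, Prod.Lex.lt_iff]
  · simp [h, Prod.Lex.lt_iff]
  · simp [h.ne', Prod.Lex.lt_iff]
    exact fun hle => absurd hle (not_le.2 h)

theorem pvSorted2_eq {α : Type} (xs : List α) (k1 : α → Int) (k2 : α → String) :
    PySem.List.sorted2 xs k1 k2 false
      = PySem.List.sorted xs (fun x => toLex (k1 x, k2 x)) false := by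
  unfold PySem.List.sorted2 PySem.List.sorted
  simp only [Bool.false_eq_true, if_false]
  congr 1
  funext acc x
  congr 1
  funext a b
  exact pvBefore_eq k1 k2 a b

-- ===== VERDICT (by name: the statement is the Claim_ definition above) =====
theorem select_canonical_key_spec : Claim_equal_select_canonical_key := by
  intro dk v _ hpre
  unfold Spec_select_canonical_key select_canonical_key select_canonical_key_alt
  simp only [pvScore_eq, pvSorted2_eq]
  have hinv : BInv dk (dk.foldl pvBucketStep (List.replicate 6 none)) := by
    have := BInv_foldl dk [] (List.replicate 6 none) BInv_init
    simpa using this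
  obtain ⟨b, hfind, hbmem, hbmin⟩ := bucket_pick dk _ hinv hpre
  rw [hfind]
  cases hs : PySem.List.sorted (dk.map (fun k => (k, (pvScoreB k : Int))))
      (fun x : String × Int => toLex (-x.2, x.1)) false with
  | nil =>
      rw [PySem.List.sorted_eq_nil_iff, List.map_eq_nil_iff] at hs
      exact absurd hs hpre
  | cons m t =>
      have hmmem : m ∈ dk.map (fun k => (k, (pvScoreB k : Int))) := by
        have := (PySem.List.sorted_perm (dk.map (fun k => (k, (pvScoreB k : Int))))
          (fun x : String × Int => toLex (-x.2, x.1)) false).mem_iff (a := m)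
        rw [hs] at this
        exact this.1 (List.mem_cons_self)
      obtain ⟨kk, hkk, hmk⟩ := List.mem_map.1 hmmem
      have h1 := PySem.List.key_head_sorted_le _ (fun x : String × Int => toLex (-x.2, x.1)) hs
      have hA : toLex (-m.2, m.1) ≤ toLex (-((pvScoreB b : Nat) : Int), b) :=
        h1 _ (List.mem_map_of_mem (l := dk) (f := fun k => (k, (pvScoreB k : Int))) hbmem)
      have hmk1 : m.1 = kk := by rw [← hmk]
      have hmk2 : m.2 = (pvScoreB kk : Int) := by rw [← hmk]
      obtain ⟨hle, heq⟩ := hbmin kk hkk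
      have hB : toLex (-((pvScoreB b : Nat) : Int), b) ≤ toLex (-m.2, m.1) := by
        rw [hmk1, hmk2]
        rcases lt_or_eq_of_le hle with hlt | he
        · refine le_of_lt (Prod.Lex.lt_iff.2 (Or.inl ?_))
          simp only [ofLex_toLex]
          omega
        · refine Prod.Lex.le_iff.2 (Or.inr ⟨?_, ?_⟩)
          · simp [he]
          · simpa using heq he
      have hfst : m.1 = b := congrArg (fun p => (ofLex p).2) (le_antisymm hA hB)
      simp [PySem.List.pyGet?, PySem.List.pyIdx?, hfst]
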